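-- pv_equiv track=rewrite | github.com/ximenaSilvaa/Computational-Methods | Programming a DFA /final.py | is_special_symbol
-- ===== SOURCE A (Python) =====
-- def is_special_symbol(token):
--     alphabet = {'parentheses'}
--     transition_table = {
--         'q0': {'parentheses': 'q1'},
--         'q1': {'parentheses': 'q1'},
--     }
--     current_state = 'q0'
--     final_states = {'q1'}
--     for char in token:
--         if char in '()':
--             input_type = 'parentheses'
--         else:
--             return False
--         current_state = transition_table[current_state].get(input_type)
--     return current_state in final_states
-- ===== SOURCE B (Python) =====
-- def is_special_symbol(token):
--     chars = set(token)
--     return bool(token) and chars <= {'(', ')'}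
-- ===== Notes on version B (the rewrite author's own statement) =====
-- stated objective: idiomatic
-- what changed: Replaces the char-by-char DFA (transition table, state stepping, early return) by building the set of distinct characters once and testing non-emptiness plus subset of the two-parenthesis set.
import Mathlib
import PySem

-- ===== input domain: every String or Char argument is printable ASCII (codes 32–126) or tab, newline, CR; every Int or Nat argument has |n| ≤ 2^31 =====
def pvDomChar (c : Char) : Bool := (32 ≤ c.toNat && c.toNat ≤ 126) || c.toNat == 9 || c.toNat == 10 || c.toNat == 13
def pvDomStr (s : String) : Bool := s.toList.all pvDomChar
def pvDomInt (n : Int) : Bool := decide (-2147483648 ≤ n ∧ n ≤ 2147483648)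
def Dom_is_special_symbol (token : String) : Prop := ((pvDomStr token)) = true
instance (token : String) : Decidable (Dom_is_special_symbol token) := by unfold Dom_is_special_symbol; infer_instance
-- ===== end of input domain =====

-- B replaces A's DFA loop (transition table + early exit) by a one-pass distinct-character set and a subset test (idiomatic).
-- ===== PORT A =====
-- early return is modelled by the recursion returning false; current_state is Option String
-- (Python's .get can yield None); transition_table[cs] is ported via get? with a getD empty
-- that is never taken on reachable states (cs is always some "q0"/"q1", both keys).
def isssTable : PySem.Dict String (PySem.Dict String String) :=
  PySem.Dict.ofList [("q0", PySem.Dict.ofList [("parentheses", "q1")]),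
                     ("q1", PySem.Dict.ofList [("parentheses", "q1")])]

def isssFinal : PySem.Set String := PySem.Set.ofList ["q1"]

def isssLoop : List Char → Option String → Bool
  | [], cs => match cs with
      | some s => PySem.Set.contains isssFinal s
      | none => false
  | c :: rest, cs =>
      if "()".toList.contains c then
        isssLoop rest (((cs.bind isssTable.get?).getD PySem.Dict.empty).get? "parentheses")
      else
        false

def is_special_symbol (token : String) : Bool :=
  isssLoop token.toList (some "q0")

-- ===== PORT B =====
def is_special_symbol_alt (token : String) : Bool :=
  let chars : PySem.Set Char := PySem.Set.ofList token.toList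
  decide (token ≠ "") && PySem.Set.issubset chars (PySem.Set.ofList ['(', ')'])

-- ===== PRECONDITION & SPEC =====
def Spec_is_special_symbol (token : String) (out : Bool) : Prop := out = is_special_symbol_alt token
instance (token : String) (out : Bool) : Decidable (Spec_is_special_symbol token out) := by unfold Spec_is_special_symbol; infer_instance

-- ===== CLAIM (what is proved, stated in full; the proofs are below) =====
def Claim_equal_is_special_symbol : Prop := ∀ (token : String), Dom_is_special_symbol token → Spec_is_special_symbol token (is_special_symbol token)

-- ===== LEMMAS AND PROOFS =====

theorem isssLoop_q1 (l : List Char) :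
    isssLoop l (some "q1") = l.all (fun c => "()".toList.contains c) := by
  induction l with
  | nil => decide
  | cons c t ih =>
      have hq1 : ((isssTable.get? "q1").getD PySem.Dict.empty).get? "parentheses"
          = some "q1" := by decide
      simp [isssLoop, hq1, ih]

theorem isss_eq (token : String) :
    is_special_symbol token
      = (decide (token.toList ≠ []) && token.toList.all (fun c => "()".toList.contains c)) := by
  unfold is_special_symbol
  cases hl : token.toList with
  | nil => decide
  | cons c t =>
      have hq0 : ((isssTable.get? "q0").getD PySem.Dict.empty).get? "parentheses"
          = some "q1" := by decide
      simp [isssLoop, hq0, isssLoop_q1]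

theorem isss_alt_eq (token : String) :
    is_special_symbol_alt token
      = (decide (token.toList ≠ []) && token.toList.all (fun c => "()".toList.contains c)) := by
  unfold is_special_symbol_alt
  show (decide (token ≠ "")
      && PySem.Set.issubset (PySem.Set.ofList token.toList) (PySem.Set.ofList ['(', ')'])) = _
  congr 1
  · rw [decide_eq_decide, ne_eq, ne_eq, not_iff_not, ← String.toList_inj, String.toList_empty]
  · rw [Bool.eq_iff_iff, PySem.Set.issubset_iff]
    simp only [List.all_eq_true]
    constructor
    · intro h c hc
      have := h c (by simpa [PySem.Set.mem_ofList] using hc)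
      simpa [PySem.Set.mem_ofList] using this
    · intro h c hc
      have := h c (by simpa [PySem.Set.mem_ofList] using hc)
      simpa [PySem.Set.mem_ofList] using this

-- ===== VERDICT (by name: the statement is the Claim_ definition above) =====
theorem is_special_symbol_spec : Claim_equal_is_special_symbol := by
  intro token _
  unfold Spec_is_special_symbol
  rw [isss_eq, isss_alt_eq]
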